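-- pv_equiv track=rewrite | github.com/thehalleyyoung/halley-labs | coalg-cert-tlaplus-compress/implementation/coacert/specs/paxos.py | _enumerate_quorums
-- ===== SOURCE A (Python) =====
-- from typing import Any, Dict, List, Optional
--
-- def _enumerate_quorums(n: int) -> List[List[int]]:
--     """Enumerate all majority subsets of {1..n}."""
--     from itertools import combinations
--     majority = n // 2 + 1
--     acceptors = list(range(1, n + 1))
--     quorums = []
--     for size in range(majority, n + 1):
--         for combo in combinations(acceptors, size):
--             quorums.append(list(combo))
--     return quorums
-- ===== SOURCE B (Python) =====
-- def _enumerate_quorums(n):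
--     """Enumerate all majority subsets of {1..n}."""
--     majority = n // 2 + 1
--     # power set of {1..n}, built incrementally
--     subsets = [[]]
--     for x in range(1, n + 1):
--         subsets = subsets + [s + [x] for s in subsets]
--     quorums = []
--     for size in range(majority, n + 1):
--         quorums += sorted(s for s in subsets if len(s) == size)
--     return quorums
-- ===== Notes on version B (the rewrite author's own statement) =====
-- stated objective: alternative
-- what changed: B builds the full power set of {1..n} incrementally, then for each majority size filters out the subsets of that size and sorts them lexicographically, instead of A's direct itertools.combinations enumeration per size.
import Mathlib
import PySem

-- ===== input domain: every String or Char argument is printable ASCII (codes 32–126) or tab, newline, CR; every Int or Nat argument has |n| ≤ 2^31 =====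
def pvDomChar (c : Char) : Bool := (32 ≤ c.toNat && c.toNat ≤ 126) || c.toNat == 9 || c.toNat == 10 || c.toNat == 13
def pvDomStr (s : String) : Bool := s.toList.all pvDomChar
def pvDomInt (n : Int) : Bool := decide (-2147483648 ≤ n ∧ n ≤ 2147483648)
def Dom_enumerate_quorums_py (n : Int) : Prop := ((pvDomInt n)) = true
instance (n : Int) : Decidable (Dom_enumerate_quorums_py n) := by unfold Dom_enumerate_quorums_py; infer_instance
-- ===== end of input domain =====

-- B enumerates the full power set of {1..n} incrementally, then filters each
-- majority size out of it and sorts that group lexicographically, instead of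
-- A's direct size-by-size combination enumeration (objective: alternative).

-- ===== PORT A =====
def enumerate_quorums_py (n : Int) : List (List Int) :=
  let majority := PySem.Int.floordiv n 2 + 1
  let acceptors := PySem.List.pyRange 1 (n + 1) 1
  (PySem.List.pyRange majority (n + 1) 1).foldl
    (fun quorums size =>
      (PySem.List.combinations acceptors size.toNat).foldl
        (fun q combo => q ++ [combo]) quorums)
    []

-- ===== PORT B =====
-- Source B's power-set loop: "subsets = [[]]; for x in range(1, n+1): subsets = subsets + [s + [x] for s in subsets]"
def pvPow (xs : List Int) : List (List Int) :=
  xs.foldl (fun subsets x => subsets ++ subsets.map (fun s => s ++ [x])) [[]]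

def enumerate_quorums_py_alt (n : Int) : List (List Int) :=
  let majority := PySem.Int.floordiv n 2 + 1
  let subsets := pvPow (PySem.List.pyRange 1 (n + 1) 1)
  (PySem.List.pyRange majority (n + 1) 1).foldl
    (fun quorums size =>
      quorums ++
        PySem.List.sorted (subsets.filter (fun s => PySem.List.len s == size))
          (fun s => s) false)
    []

-- ===== PRECONDITION & SPEC =====
def Spec_enumerate_quorums_py (n : Int) (out : List (List Int)) : Prop := out = enumerate_quorums_py_alt n
instance (n : Int) (out : List (List Int)) : Decidable (Spec_enumerate_quorums_py n out) := by unfold Spec_enumerate_quorums_py; infer_instance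

-- ===== CLAIM =====
def Claim_equal_enumerate_quorums_py : Prop := ∀ (n : Int), Dom_enumerate_quorums_py n → Spec_enumerate_quorums_py n (enumerate_quorums_py n)

-- ===== LEMMAS AND PROOFS =====

theorem pvPow_append_singleton (l : List Int) (x : Int) :
    pvPow (l ++ [x]) = pvPow l ++ (pvPow l).map (fun s => s ++ [x]) := by
  simp [pvPow, List.foldl_append]

-- the power-set fold contains exactly the sublists of its input
theorem pvMem_pvPow (xs : List Int) : ∀ s, s ∈ pvPow xs ↔ s.Sublist xs := by
  induction xs using List.reverseRecOn with
  | nil => intro s; simp [pvPow]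
  | append_singleton l x ih =>
      intro s
      rw [pvPow_append_singleton]
      simp only [List.mem_append, List.mem_map, ih]
      constructor
      · rintro (h | ⟨t, ht, rfl⟩)
        · exact h.trans (List.sublist_append_left l [x])
        · exact ht.append (List.Sublist.refl [x])
      · intro h
        rcases List.sublist_append_iff.mp h with ⟨l₁, l₂, rfl, h₁, h₂⟩
        rcases List.sublist_singleton.mp h₂ with rfl | rfl
        · exact Or.inl (by simpa using h₁)
        · exact Or.inr ⟨l₁, h₁, rfl⟩

theorem pvNodup_pvPow (xs : List Int) (h : xs.Nodup) : (pvPow xs).Nodup := by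
  induction xs using List.reverseRecOn with
  | nil => simp [pvPow]
  | append_singleton l x ih =>
      rw [pvPow_append_singleton]
      rcases List.nodup_append.mp h with ⟨hl, -, hdisj⟩
      have hx : x ∉ l := fun hm => hdisj x hm x (by simp) rfl
      refine List.Nodup.append (ih hl) ((ih hl).map (List.append_left_injective [x])) ?_
      intro s hs hmem
      rcases List.mem_map.mp hmem with ⟨t, -, rfl⟩
      exact hx (((pvMem_pvPow l _).mp hs).mem (by simp))

theorem pvPairwise_pyRange_aux : ∀ (m : Nat) (a b : Int), (b - a).toNat ≤ m →
    (PySem.List.pyRange a b 1).Pairwise (· < ·)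
  | 0, a, b, h => by
      rw [PySem.List.pyRange_one_eq_nil (by omega)]; exact List.Pairwise.nil
  | m + 1, a, b, h => by
      by_cases hab : a < b
      · rw [PySem.List.pyRange_one_cons hab]
        refine List.Pairwise.cons ?_ (pvPairwise_pyRange_aux m (a + 1) b (by omega))
        intro x hx
        have := (PySem.List.mem_pyRange_one.mp hx).1
        omega
      · rw [PySem.List.pyRange_one_eq_nil (by omega)]; exact List.Pairwise.nil

theorem pvPairwise_pyRange (a b : Int) : (PySem.List.pyRange a b 1).Pairwise (· < ·) :=
  pvPairwise_pyRange_aux (b - a).toNat a b le_rfl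

theorem pvNodup_pyRange (a b : Int) : (PySem.List.pyRange a b 1).Nodup :=
  (pvPairwise_pyRange a b).imp (fun h => ne_of_lt h)

theorem pvNodup_combinations (xs : List Int) (r : Nat) (h : xs.Nodup) :
    (PySem.List.combinations xs r).Nodup := by
  induction xs generalizing r with
  | nil =>
      cases r with
      | zero => simp [PySem.List.combinations_zero]
      | succ r => simp [PySem.List.combinations_nil_succ]
  | cons x xs ih =>
      cases r with
      | zero => simp [PySem.List.combinations_zero]
      | succ r =>
          rw [PySem.List.combinations_cons_succ]
          rcases List.nodup_cons.mp h with ⟨hx, hxs⟩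
          refine List.Nodup.append ((ih r hxs).map List.cons_injective) (ih (r + 1) hxs) ?_
          intro c hc
          rcases List.mem_map.mp hc with ⟨d, -, rfl⟩
          intro hmem
          exact hx ((PySem.List.sublist_of_mem_combinations hmem).mem (by simp))

theorem pvPairwise_combinations (xs : List Int) (r : Nat) (h : xs.Pairwise (· < ·)) :
    (PySem.List.combinations xs r).Pairwise (· < ·) := by
  induction xs generalizing r with
  | nil =>
      cases r with
      | zero => simp [PySem.List.combinations_zero]
      | succ r => simp [PySem.List.combinations_nil_succ]
  | cons x xs ih =>
      cases r with
      | zero => simp [PySem.List.combinations_zero]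
      | succ r =>
          rw [PySem.List.combinations_cons_succ]
          rcases List.pairwise_cons.mp h with ⟨hx, hxs⟩
          rw [List.pairwise_append]
          refine ⟨?_, ih (r + 1) hxs, ?_⟩
          · rw [List.pairwise_map]
            exact (ih r hxs).imp (fun hlt => List.cons_lt_cons_iff.mpr (Or.inr ⟨rfl, hlt⟩))
          · intro a ha d hd
            rcases List.mem_map.mp ha with ⟨c, -, rfl⟩
            cases d with
            | nil => exact absurd (PySem.List.length_of_mem_combinations hd) (by simp)
            | cons y d' =>
                have hy : y ∈ xs :=
                  (PySem.List.sublist_of_mem_combinations hd).mem (by simp)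
                exact List.cons_lt_cons_iff.mpr (Or.inl (hx y hy))

-- the sorted size-k slice of the power set is exactly combinations(range, k)
theorem pvBlockEq (n size : Int) (hsz : 0 ≤ size) :
    PySem.List.sorted
        ((pvPow (PySem.List.pyRange 1 (n + 1) 1)).filter
          (fun s => PySem.List.len s == size)) (fun s => s) false
      = PySem.List.combinations (PySem.List.pyRange 1 (n + 1) 1) size.toNat := by
  have hperm : (PySem.List.combinations (PySem.List.pyRange 1 (n + 1) 1) size.toNat).Perm
      ((pvPow (PySem.List.pyRange 1 (n + 1) 1)).filter (fun s => PySem.List.len s == size)) := by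
    apply List.perm_of_nodup_nodup_toFinset_eq
    · exact pvNodup_combinations _ _ (pvNodup_pyRange 1 (n + 1))
    · exact (pvNodup_pvPow _ (pvNodup_pyRange 1 (n + 1))).filter _
    · ext a
      simp only [List.mem_toFinset, List.mem_filter, pvMem_pvPow,
        PySem.List.mem_combinations_iff, PySem.List.len_eq, beq_iff_eq]
      constructor
      · rintro ⟨hsub, hlen⟩
        exact ⟨hsub, by omega⟩
      · rintro ⟨hsub, hlen⟩
        exact ⟨hsub, by omega⟩
  have hpw := pvPairwise_combinations _ size.toNat (pvPairwise_pyRange 1 (n + 1))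
  refine Eq.trans ?_ (PySem.List.sorted_eq_of_perm_of_pairwise_lt _ _ (fun s => s) hperm hpw)
  congr 1

-- ===== VERDICT =====
theorem enumerate_quorums_py_spec : Claim_equal_enumerate_quorums_py := by
  intro n _
  unfold Spec_enumerate_quorums_py enumerate_quorums_py enumerate_quorums_py_alt
  dsimp only
  apply PySem.List.foldl_congr_mem
  intro quorums size hmem
  obtain ⟨h1, h2⟩ := PySem.List.mem_pyRange_one.mp hmem
  have hd := PySem.Int.floordiv_mul_add_mod n 2
  have hm0 : 0 ≤ PySem.Int.mod n 2 := PySem.Int.mod_nonneg n (by norm_num)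
  have hm1 : PySem.Int.mod n 2 < 2 := PySem.Int.mod_lt n (by norm_num)
  have hsz : 0 ≤ size := by omega
  rw [PySem.List.foldl_append_singleton_eq_self, pvBlockEq n size hsz]
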